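-- pv_equiv track=rewrite | github.com/NicholasClooney/ProjectSpire | Lab/audits/card_parser_coverage.py | extract_placeholders
-- ===== SOURCE A (Python) =====
-- def extract_placeholders(markup: str) -> set[str]:
--     placeholders: set[str] = set()
--     depth = 0
--     start: int | None = None
--     for index, char in enumerate(markup):
--         if char == "{":
--             if depth == 0:
--                 start = index + 1
--             depth += 1
--         elif char == "}" and depth > 0:
--             depth -= 1
--             if depth == 0 and start is not None:
--                 placeholders.add(markup[start:index])
--     return placeholders
-- ===== SOURCE B (Python) =====
-- def extract_placeholders(markup: str) -> set[str]:
--     # Pass 1: clamped brace depth after each character.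
--     depths = []
--     d = 0
--     for ch in markup:
--         if ch == "{":
--             d += 1
--         elif ch == "}" and d > 0:
--             d -= 1
--         depths.append(d)
--     # Pass 2: detect 0->1 transitions (span start) and 1->0 transitions (span end).
--     result: set[str] = set()
--     prev = 0
--     start = 0
--     for i, d in enumerate(depths):
--         if prev == 0 and d == 1:
--             start = i + 1
--         elif prev == 1 and d == 0:
--             result.add(markup[start:i])
--         prev = d
--     return result
-- ===== Notes on version B (the rewrite author's own statement) =====
-- stated objective: alternative
-- what changed: B replaces A's single stateful scan (depth counter + pending start, emitting inside the loop) by two differently-shaped passes: first build the clamped-depth table after each character, then scan that table for 0->1 transitions (span start) and 1->0 transitions (slice out the placeholder).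
import Mathlib
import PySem

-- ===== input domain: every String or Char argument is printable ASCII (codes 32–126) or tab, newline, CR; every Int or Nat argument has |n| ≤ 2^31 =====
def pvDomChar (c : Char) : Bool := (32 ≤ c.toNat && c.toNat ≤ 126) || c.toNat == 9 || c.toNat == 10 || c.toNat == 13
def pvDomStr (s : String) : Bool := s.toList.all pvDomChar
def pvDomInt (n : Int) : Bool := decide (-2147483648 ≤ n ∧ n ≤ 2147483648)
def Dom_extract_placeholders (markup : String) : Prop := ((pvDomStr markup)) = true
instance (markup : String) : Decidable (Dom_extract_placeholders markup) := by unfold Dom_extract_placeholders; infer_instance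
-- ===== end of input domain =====

-- B is a two-pass re-decomposition of A (depth table, then transition scan); same cost, RETURN-value equivalence.

-- ===== PORT A =====
-- loop body of A's single scan: state = (placeholders, depth, start)
def pvStepA (md : List Char) (s : PySem.Set String × Int × Option Int) (p : Int × Char) :
    PySem.Set String × Int × Option Int :=
  if p.2 = '{' then
    ((s.1, s.2.1 + 1, if s.2.1 = 0 then some (p.1 + 1) else s.2.2))
  else if p.2 = '}' ∧ 0 < s.2.1 then
    let depth' := s.2.1 - 1
    if depth' = 0 then
      match s.2.2 with
      | some st =>
          (PySem.Set.add s.1 (String.ofList (PySem.List.slice md (some st) (some p.1))), depth', s.2.2)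
      | none => (s.1, depth', s.2.2)
    else (s.1, depth', s.2.2)
  else s

def extract_placeholders (markup : String) : List String :=
  ((PySem.List.enumerate markup.toList 0).foldl (pvStepA markup.toList)
    (PySem.Set.empty, 0, none)).1

-- ===== PORT B =====
-- pass 1 body: append the clamped depth after each character
def pvDepthStep (acc : List Int × Int) (ch : Char) : List Int × Int :=
  let d' := if ch = '{' then acc.2 + 1 else if ch = '}' ∧ 0 < acc.2 then acc.2 - 1 else acc.2
  (acc.1 ++ [d'], d')

-- pass 2 body: state = (result, prev, start); 0->1 records a start, 1->0 slices a placeholder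
def pvStepB (md : List Char) (s : PySem.Set String × Int × Int) (p : Int × Int) :
    PySem.Set String × Int × Int :=
  if s.2.1 = 0 ∧ p.2 = 1 then (s.1, p.2, p.1 + 1)
  else if s.2.1 = 1 ∧ p.2 = 0 then
    (PySem.Set.add s.1 (String.ofList (PySem.List.slice md (some s.2.2) (some p.1))), p.2, s.2.2)
  else (s.1, p.2, s.2.2)

def extract_placeholders_alt (markup : String) : List String :=
  let depths := (markup.toList.foldl pvDepthStep ([], 0)).1
  ((PySem.List.enumerate depths 0).foldl (pvStepB markup.toList)
    (PySem.Set.empty, 0, 0)).1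

-- ===== PRECONDITION & SPEC =====
def Spec_extract_placeholders (markup : String) (out : List String) : Prop := out = extract_placeholders_alt markup
instance (markup : String) (out : List String) : Decidable (Spec_extract_placeholders markup out) := by unfold Spec_extract_placeholders; infer_instance

-- ===== CLAIM (what is proved, stated in full; the proofs are below) =====
def Claim_equal_extract_placeholders : Prop := ∀ (markup : String), Dom_extract_placeholders markup → Spec_extract_placeholders markup (extract_placeholders markup)

-- ===== LEMMAS AND PROOFS =====

-- the depth table as a structural recursion (scanl of the clamped step)
def pvDepths (d : Int) : List Char → List Int
  | [] => []
  | c :: l =>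
      let d' := if c = '{' then d + 1 else if c = '}' ∧ 0 < d then d - 1 else d
      d' :: pvDepths d' l

theorem pvDepths_foldl (l : List Char) (acc : List Int) (d : Int) :
    (l.foldl pvDepthStep (acc, d)).1 = acc ++ pvDepths d l := by
  induction l generalizing acc d with
  | nil => simp [pvDepths]
  | cons c l ih =>
      simp only [List.foldl_cons, pvDepthStep, pvDepths]
      rw [ih]
      simp

theorem pvMain (md l : List Char) (i d : Int) (S : PySem.Set String)
    (sA : Option Int) (sB : Int) (hd : 0 ≤ d) (hs : 1 ≤ d → sA = some sB) :
    ((PySem.List.enumerate l i).foldl (pvStepA md) (S, d, sA)).1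
      = ((PySem.List.enumerate (pvDepths d l) i).foldl (pvStepB md) (S, d, sB)).1 := by
  induction l generalizing i d S sA sB with
  | nil => simp [pvDepths]
  | cons c l ih =>
      simp only [pvDepths, PySem.List.enumerate_cons, List.foldl_cons]
      by_cases hc : c = '{'
      · subst hc
        simp only [pvStepA, pvStepB]
        by_cases h0 : d = 0
        · subst h0
          simp
          exact ih (i + 1) 1 S (some (i + 1)) (i + 1) (by omega) (fun _ => rfl)
        · simp [h0, (show ¬ (d + 1 = 0) by omega), (show ¬ (d + 1 = 1) by omega)]
          exact ih (i + 1) (d + 1) S sA sB (by omega) (fun _ => hs (by omega))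
      · by_cases hcl : c = '}' ∧ 0 < d
        · obtain ⟨hc2, hdp⟩ := hcl
          subst hc2
          simp only [pvStepA, pvStepB]
          by_cases h1 : d = 1
          · subst h1
            have hsa : sA = some sB := hs le_rfl
            simp [hsa]
            exact ih (i + 1) 0 _ (some sB) sB le_rfl (by omega)
          · simp [hdp, (show ¬ (d - 1 = 0) by omega), (show ¬ (d = 0) by omega), h1]
            exact ih (i + 1) (d - 1) S sA sB (by omega) (fun _ => hs (by omega))
        · simp only [pvStepA, pvStepB]
          simp [hc, hcl, (show ¬ (d = 0 ∧ d = 1) by omega), (show ¬ (d = 1 ∧ d = 0) by omega)]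
          exact ih (i + 1) d S sA sB hd hs

-- ===== VERDICT (by name: the statement is the Claim_ definition above) =====
theorem extract_placeholders_spec : Claim_equal_extract_placeholders := by
  intro markup _
  unfold Spec_extract_placeholders extract_placeholders extract_placeholders_alt
  rw [pvDepths_foldl markup.toList [] 0]
  simpa using pvMain markup.toList markup.toList 0 0 PySem.Set.empty none 0 le_rfl (by omega)
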